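-- pv_equiv track=rewrite | github.com/JeronimoRestrepo48/autOSINT | osint_colombia.py | _analyze_business_risk
-- ===== SOURCE A (Python) =====
-- from typing import Dict, List, Optional, Any
--
-- def _analyze_business_risk(results: Dict) -> str:
--     """Análisis de nivel de riesgo para empresas"""
--     risk_score = 0
--
--     # Evaluar sanciones
--     if results['sources'].get('sanctions'):
--         for sanction_entity in results['sources']['sanctions']:
--             if sanction_entity.get('sanctions') or sanction_entity.get('fines'):
--                 risk_score += 3
--
--     # Evaluar presencia en medios (negativa)
--     if results['sources'].get('media'):
--         media_count = len(results['sources']['media'])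
--         if media_count > 3:
--             risk_score += 2
--
--     # Determinar nivel de riesgo
--     if risk_score >= 3:
--         return 'high'
--     elif risk_score >= 1:
--         return 'medium'
--     else:
--         return 'low'
-- ===== SOURCE B (Python) =====
-- def _analyze_business_risk(results):
--     """Análisis de nivel de riesgo para empresas"""
--     sources = results['sources']
--     if any(e.get('sanctions') or e.get('fines') for e in (sources.get('sanctions') or [])):
--         return 'high'
--     if len(sources.get('media') or []) > 3:
--         return 'medium'
--     return 'low'
-- ===== Notes on version B (the rewrite author's own statement) =====
-- stated objective: simpler
-- what changed: Drops the risk_score accumulator and thresholds: B short-circuits with any() over sanction entities to return 'high' immediately, then a single media-length test for 'medium', else 'low'.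
import Mathlib
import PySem

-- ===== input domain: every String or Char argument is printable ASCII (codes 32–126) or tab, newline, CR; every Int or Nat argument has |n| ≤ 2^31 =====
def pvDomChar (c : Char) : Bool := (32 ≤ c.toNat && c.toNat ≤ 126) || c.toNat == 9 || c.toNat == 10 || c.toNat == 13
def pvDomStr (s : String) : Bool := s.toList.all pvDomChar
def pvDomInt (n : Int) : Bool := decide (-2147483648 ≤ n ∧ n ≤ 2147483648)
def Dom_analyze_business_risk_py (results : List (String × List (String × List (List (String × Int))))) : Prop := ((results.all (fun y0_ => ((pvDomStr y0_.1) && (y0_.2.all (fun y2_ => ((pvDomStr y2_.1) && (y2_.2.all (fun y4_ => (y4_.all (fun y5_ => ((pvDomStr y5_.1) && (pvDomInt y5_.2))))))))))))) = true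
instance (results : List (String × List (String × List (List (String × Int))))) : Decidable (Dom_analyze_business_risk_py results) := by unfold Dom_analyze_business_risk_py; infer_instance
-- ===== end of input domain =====

-- B replaces A's risk_score accumulator and thresholds with direct short-circuit returns
-- (any sanction/fine hit -> 'high'; media count > 3 -> 'medium'; else 'low'); same values.

-- shared transliteration of `e.get('sanctions') or e.get('fines')` (Python truthiness: absent or 0 is falsy)
def pvHit (e : List (String × Int)) : Bool :=
  ((PySem.Dict.mk e).getD "sanctions" 0 != 0) || ((PySem.Dict.mk e).getD "fines" 0 != 0)

-- ===== PORT A =====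
def pvRiskScore (sources : PySem.Dict String (List (List (String × Int)))) : Int :=
  (if sources.getD "sanctions" [] ≠ [] then
      (sources.getD "sanctions" []).foldl (fun acc e => if pvHit e then acc + 3 else acc) (0 : Int)
    else 0)
  + (if sources.getD "media" [] ≠ [] ∧ (sources.getD "media" []).length > 3 then 2 else 0)

def analyze_business_risk_py (results : List (String × List (String × List (List (String × Int))))) : String :=
  -- results['sources'] (Pre_ excludes the KeyError case; getD default is then never used)
  if pvRiskScore (PySem.Dict.mk ((PySem.Dict.mk results).getD "sources" [])) ≥ 3 then "high"
  else if pvRiskScore (PySem.Dict.mk ((PySem.Dict.mk results).getD "sources" [])) ≥ 1 then "medium"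
  else "low"

-- ===== PORT B =====
def analyze_business_risk_py_alt (results : List (String × List (String × List (List (String × Int))))) : String :=
  if ((PySem.Dict.mk ((PySem.Dict.mk results).getD "sources" [])).getD "sanctions" []).any pvHit then "high"
  else if ((PySem.Dict.mk ((PySem.Dict.mk results).getD "sources" [])).getD "media" []).length > 3 then "medium"
  else "low"

-- ===== PRECONDITION & SPEC =====
-- Pre_ excludes exactly the inputs on which A raises KeyError: no 'sources' key.
def Pre_analyze_business_risk_py (results : List (String × List (String × List (List (String × Int))))) : Prop :=
  "sources" ∈ results.map Prod.fst
instance (results : List (String × List (String × List (List (String × Int))))) : Decidable (Pre_analyze_business_risk_py results) := by unfold Pre_analyze_business_risk_py; infer_instance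

def pvWitness_analyze_business_risk_py : (List (String × List (String × List (List (String × Int))))) :=
  [("sources", [("sanctions", [[("fines", 1)]])])]

def Spec_analyze_business_risk_py (results : List (String × List (String × List (List (String × Int))))) (out : String) : Prop := out = analyze_business_risk_py_alt results
instance (results : List (String × List (String × List (List (String × Int))))) (out : String) : Decidable (Spec_analyze_business_risk_py results out) := by unfold Spec_analyze_business_risk_py; infer_instance

-- ===== CLAIM (what is proved, stated in full; the proofs are below) =====
def Claim_equal_analyze_business_risk_py : Prop := ∀ (results : List (String × List (String × List (List (String × Int))))), Dom_analyze_business_risk_py results → Pre_analyze_business_risk_py results → Spec_analyze_business_risk_py results (analyze_business_risk_py results)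

-- ===== LEMMAS AND PROOFS =====

-- A's accumulation loop adds nothing when no entity hits …
theorem pv_foldl_no_hit (l : List (List (String × Int))) (acc : Int)
    (h : l.any pvHit = false) :
    l.foldl (fun acc e => if pvHit e then acc + 3 else acc) acc = acc := by
  induction l generalizing acc with
  | nil => rfl
  | cons e t ih =>
    simp only [List.any_cons, Bool.or_eq_false_iff] at h
    simp [List.foldl_cons, h.1, ih _ h.2]

-- … and adds at least 3 as soon as one entity hits.
theorem pv_foldl_hit (l : List (List (String × Int))) (acc : Int)
    (h : l.any pvHit = true) :
    acc + 3 ≤ l.foldl (fun acc e => if pvHit e then acc + 3 else acc) acc := by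
  induction l generalizing acc with
  | nil => simp at h
  | cons e t ih =>
    by_cases he : pvHit e = true
    · have : acc + 3 ≤ t.foldl (fun acc e => if pvHit e then acc + 3 else acc) (acc + 3) := by
        by_cases ht : t.any pvHit = true
        · exact le_trans (by omega) (ih _ ht)
        · simp [pv_foldl_no_hit t (acc + 3) (by simpa using ht)]
      simpa [List.foldl_cons, he] using this
    · simp only [List.any_cons, he, Bool.false_or] at h
      simpa [List.foldl_cons, he] using ih acc h

-- the two decision procedures agree on every sources dict
theorem pv_key (d : PySem.Dict String (List (List (String × Int)))) :
    (if pvRiskScore d ≥ 3 then "high"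
     else if pvRiskScore d ≥ 1 then "medium" else "low")
    = (if (d.getD "sanctions" []).any pvHit then "high"
       else if (d.getD "media" []).length > 3 then "medium" else "low") := by
  unfold pvRiskScore
  generalize hl : d.getD "sanctions" [] = l
  generalize hm : d.getD "media" [] = m
  by_cases hany : l.any pvHit = true
  · have hne : l ≠ [] := by
      intro h0; rw [h0] at hany; simp at hany
    have h3 : (3 : Int) ≤ l.foldl (fun acc e => if pvHit e then acc + 3 else acc) 0 := by
      simpa using pv_foldl_hit l 0 hany
    simp only [hne, hany, ne_eq, not_false_iff, if_true]
    split_ifs with hmed hge <;> first | rfl | omega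
  · have hz : (if l ≠ [] then l.foldl (fun acc e => if pvHit e then acc + 3 else acc) (0 : Int) else 0) = 0 := by
      split_ifs with h
      · exact pv_foldl_no_hit l 0 (by simpa using hany)
      · rfl
    rw [hz]
    simp only [Bool.not_eq_true] at hany
    rw [hany]
    by_cases hlen : m.length > 3
    · have hne : m ≠ [] := by
        intro h0; rw [h0] at hlen; simp at hlen
      simp [hne, hlen]
    · simp [hlen]

-- ===== VERDICT (by name: the statement is the Claim_ definition above) =====
theorem analyze_business_risk_py_spec : Claim_equal_analyze_business_risk_py := by
  intro results _ _
  unfold Spec_analyze_business_risk_py analyze_business_risk_py analyze_business_risk_py_alt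
  exact pv_key _
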